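-- pv_equiv track=rewrite | github.com/aposthenes/textAdventure | methods.py | formatToStr
-- ===== SOURCE A (Python) =====
-- def formatToStr(str1, str2):
--     map1 = str1.split("\n")
--     desc2 = str2.split("\n")
--     formatted = ""
--
--     if(len(map1) > len(desc2)):
--         for i in range(len(desc2)):
--             formatted += map1[i] + "    " + desc2[i] + "\n"
--         for j in range(len(desc2), len(map1)):
--             formatted += map1[j] + "\n"
--     elif(len(map1) < len(desc2)):
--         for i in range(len(map1)):
--             formatted += map1[i] + "    " + desc2[i] + "\n"
--         for j in range(len(map1), len(desc2)):
--             formatted += desc2[j] + "\n"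
--     else:
--         for i in range(len(map1)):
--             formatted += map1[i] + "    " + desc2[i] + "\n"
--
--     formatted + formatted[:-1]
--     return formatted
-- ===== SOURCE B (Python) =====
-- def formatToStr(str1, str2):
--     xs = str1.split("\n")
--     ys = str2.split("\n")
--     parts = []
--     i = 0
--     while i < len(xs) or i < len(ys):
--         cells = []
--         if i < len(xs):
--             cells.append(xs[i])
--         if i < len(ys):
--             cells.append(ys[i])
--         parts.append("    ".join(cells))
--         parts.append("\n")
--         i += 1
--     return "".join(parts)
-- ===== Notes on version B (the rewrite author's own statement) =====
-- stated objective: alternative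
-- what changed: Replaces A's up-front three-way length branching with separate pair/tail loops by ONE row-wise loop: for each row index up to the longer side, it collects whichever cells exist at that index and joins them with the 4-space separator, accumulating pieces in a list joined once at the end.
import Mathlib
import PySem

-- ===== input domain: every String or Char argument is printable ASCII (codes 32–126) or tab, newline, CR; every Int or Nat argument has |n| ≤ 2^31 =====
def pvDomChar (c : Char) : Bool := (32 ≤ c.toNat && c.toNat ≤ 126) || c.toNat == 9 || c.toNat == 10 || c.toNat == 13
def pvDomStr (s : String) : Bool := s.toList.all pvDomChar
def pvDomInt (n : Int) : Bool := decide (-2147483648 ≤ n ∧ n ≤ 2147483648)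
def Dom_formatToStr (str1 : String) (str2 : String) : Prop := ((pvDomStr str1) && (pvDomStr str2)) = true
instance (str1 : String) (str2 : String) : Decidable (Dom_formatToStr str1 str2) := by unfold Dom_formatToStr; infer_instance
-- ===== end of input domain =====

-- B builds each output row independently in one loop over row indices (joining the cells present at
-- that index with the 4-space separator), replacing A's three-way length branching (objective: alternative).


-- ===== PORT A =====
-- str.split("\n") is ported as PySem.Str.split?; the separator is a nonempty literal, so split? is
-- always some and .getD [] only discharges the Option. A's statement `formatted + formatted[:-1]`
-- discards its value (a no-op), so it has no counterpart here.
def formatToStr (str1 : String) (str2 : String) : String :=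
  let map1 := (PySem.Str.split? str1 "\n").getD []
  let desc2 := (PySem.Str.split? str2 "\n").getD []
  let formatted := ""
  if map1.length > desc2.length then
    let f1 := (PySem.List.pyRange 0 (desc2.length : Int) 1).foldl
      (fun acc i => acc ++ PySem.List.pyGetD map1 i "" ++ "    " ++ PySem.List.pyGetD desc2 i "" ++ "\n") formatted
    (PySem.List.pyRange (desc2.length : Int) (map1.length : Int) 1).foldl
      (fun acc j => acc ++ PySem.List.pyGetD map1 j "" ++ "\n") f1
  else if map1.length < desc2.length then
    let f1 := (PySem.List.pyRange 0 (map1.length : Int) 1).foldl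
      (fun acc i => acc ++ PySem.List.pyGetD map1 i "" ++ "    " ++ PySem.List.pyGetD desc2 i "" ++ "\n") formatted
    (PySem.List.pyRange (map1.length : Int) (desc2.length : Int) 1).foldl
      (fun acc j => acc ++ PySem.List.pyGetD desc2 j "" ++ "\n") f1
  else
    (PySem.List.pyRange 0 (map1.length : Int) 1).foldl
      (fun acc i => acc ++ PySem.List.pyGetD map1 i "" ++ "    " ++ PySem.List.pyGetD desc2 i "" ++ "\n") formatted

-- ===== PORT B =====
-- B's while loop runs i = 0,1,… while i < len(xs) or i < len(ys), i.e. for i < max of the lengths;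
-- it is ported as a fold over List.range of that max carrying the parts list. Inside the loop the
-- guarded xs[i]/ys[i] (always in range) are List.getD.
def formatToStr_alt (str1 : String) (str2 : String) : String :=
  let xs := (PySem.Str.split? str1 "\n").getD []
  let ys := (PySem.Str.split? str2 "\n").getD []
  let parts := (List.range (max xs.length ys.length)).foldl
    (fun acc i =>
      let cells := (if i < xs.length then [xs.getD i ""] else [])
                ++ (if i < ys.length then [ys.getD i ""] else [])
      acc ++ [PySem.Str.join "    " cells, "\n"]) []
  PySem.Str.join "" parts

-- ===== PRECONDITION & SPEC =====
def Spec_formatToStr (str1 : String) (str2 : String) (out : String) : Prop := out = formatToStr_alt str1 str2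
instance (str1 : String) (str2 : String) (out : String) : Decidable (Spec_formatToStr str1 str2 out) := by unfold Spec_formatToStr; infer_instance

-- ===== CLAIM (what is proved, stated in full; the proofs are below) =====
def Claim_equal_formatToStr : Prop := ∀ (str1 : String) (str2 : String), Dom_formatToStr str1 str2 → Spec_formatToStr str1 str2 (formatToStr str1 str2)

-- ===== LEMMAS AND PROOFS =====
theorem pv_join_nil : PySem.Str.join "" ([] : List String) = "" := rfl
theorem pv_intercalate_nil {α : Type} (l : List (List α)) : List.intercalate [] l = l.flatten := by
  induction l with
  | nil => rfl
  | cons a t ih =>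
    cases t with
    | nil => simp [List.intercalate]
    | cons b t' => simp_all [List.intercalate]
theorem pv_join_cons (x : String) (l : List String) :
    PySem.Str.join "" (x :: l) = x ++ PySem.Str.join "" l := by
  simp [PySem.Str.join, PySem.Chars.join, pv_intercalate_nil]
theorem pv_join_append (l1 l2 : List String) :
    PySem.Str.join "" (l1 ++ l2) = PySem.Str.join "" l1 ++ PySem.Str.join "" l2 := by
  induction l1 with
  | nil => simp [pv_join_nil]
  | cons x t ih => simp [pv_join_cons, ih, String.append_assoc]
theorem pv_foldl_join (l : List String) (f : String → String) (acc : String) :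
    l.foldl (fun a x => a ++ f x) acc = acc ++ PySem.Str.join "" (l.map f) := by
  induction l generalizing acc with
  | nil => simp [pv_join_nil]
  | cons x t ih => simp [pv_join_cons, ih, String.append_assoc]
theorem pv_pyRange_fold {β : Type} (n : Nat) (g : β → Int → β) (acc : β) :
    (PySem.List.pyRange 0 (n : Int) 1).foldl g acc
      = (List.range n).foldl (fun a (k : Nat) => g a (k : Int)) acc := by
  induction n with
  | zero => rfl
  | succ m ih =>
    rw [show ((m+1 : Nat) : Int) = (m : Int) + 1 by push_cast; ring]
    rw [PySem.List.pyRange_one_succ_right (by positivity), List.range_succ]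
    simp [List.foldl_append, ih]
theorem pv_foldl_range_zip {α β : Type} (f : β → α → α → β) (d : α) :
    ∀ (xs ys : List α) (acc : β),
      (List.range (min xs.length ys.length)).foldl
        (fun a k => f a (xs.getD k d) (ys.getD k d)) acc
      = (xs.zip ys).foldl (fun a p => f a p.1 p.2) acc := by
  intro xs
  induction xs with
  | nil => intro ys acc; simp
  | cons x xs ih =>
    intro ys acc
    cases ys with
    | nil => simp
    | cons y ys =>
      have h : min (x :: xs).length (y :: ys).length = min xs.length ys.length + 1 := by
        simp [Nat.succ_min_succ]
      rw [h, List.range_succ_eq_map, List.foldl_cons, List.foldl_map]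
      simp only [List.getD_cons_zero, List.getD_cons_succ]
      rw [ih]
      simp [List.zip]

theorem pairLoop (xs ys : List String) (m : Nat) (hm : m = min xs.length ys.length) :
      (PySem.List.pyRange 0 (m : Int) 1).foldl
        (fun acc i => acc ++ PySem.List.pyGetD xs i "" ++ "    " ++ PySem.List.pyGetD ys i "" ++ "\n") ""
      = PySem.Str.join "" (((xs.zip ys).map (fun p => p.1 ++ "    " ++ p.2)).map (fun line => line ++ "\n")) := by
  rw [pv_pyRange_fold, hm]
  simp only [PySem.List.pyGetD_natCast]
  rw [pv_foldl_range_zip (fun (a : String) (u v : String) => a ++ u ++ "    " ++ v ++ "\n") "" xs ys ""]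
  have hb : (fun (a : String) (p : String × String) => a ++ p.1 ++ "    " ++ p.2 ++ "\n")
      = (fun (a : String) (p : String × String) => a ++ ((p.1 ++ "    " ++ p.2) ++ "\n")) := by
    funext a p; simp [String.append_assoc]
  rw [hb, ← List.foldl_map (f := fun p : String × String => (p.1 ++ "    " ++ p.2) ++ "\n")
      (g := fun (a x : String) => a ++ x)]
  rw [show (fun (a x : String) => a ++ x) = (fun (a x : String) => a ++ id x) from rfl]
  rw [pv_foldl_join]
  simp [List.map_map, Function.comp_def]

theorem tailLoop (l : List String) (k : Nat) (acc : String) :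
      (PySem.List.pyRange (k : Int) (l.length : Int) 1).foldl
        (fun acc j => acc ++ PySem.List.pyGetD l j "" ++ "\n") acc
      = acc ++ PySem.Str.join "" ((l.drop k).map (fun line => line ++ "\n")) := by
  have hbody : (fun (acc : String) (j : Int) => acc ++ PySem.List.pyGetD l j "" ++ "\n")
      = (fun (acc : String) (j : Int) => acc ++ (PySem.List.pyGetD l j "" ++ "\n")) := by
    funext a j; simp [String.append_assoc]
  rw [hbody, PySem.List.foldl_pyRange_pyGetD' (xs := l) (d := "")
      (f := fun (a x : String) => a ++ (x ++ "\n")) (init := acc) (a := (k : Int)) (by positivity)]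
  rw [← List.foldl_map (f := fun x : String => x ++ "\n") (g := fun (a x : String) => a ++ x)]
  rw [show (fun (a x : String) => a ++ x) = (fun (a x : String) => a ++ id x) from rfl]
  rw [pv_foldl_join]
  simp

theorem pv_core (xs ys : List String) :
    (if xs.length > ys.length then
      let f1 := (PySem.List.pyRange 0 (ys.length : Int) 1).foldl
        (fun acc i => acc ++ PySem.List.pyGetD xs i "" ++ "    " ++ PySem.List.pyGetD ys i "" ++ "\n") ""
      (PySem.List.pyRange (ys.length : Int) (xs.length : Int) 1).foldl
        (fun acc j => acc ++ PySem.List.pyGetD xs j "" ++ "\n") f1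
    else if xs.length < ys.length then
      let f1 := (PySem.List.pyRange 0 (xs.length : Int) 1).foldl
        (fun acc i => acc ++ PySem.List.pyGetD xs i "" ++ "    " ++ PySem.List.pyGetD ys i "" ++ "\n") ""
      (PySem.List.pyRange (xs.length : Int) (ys.length : Int) 1).foldl
        (fun acc j => acc ++ PySem.List.pyGetD ys j "" ++ "\n") f1
    else
      (PySem.List.pyRange 0 (xs.length : Int) 1).foldl
        (fun acc i => acc ++ PySem.List.pyGetD xs i "" ++ "    " ++ PySem.List.pyGetD ys i "" ++ "\n") "")
    = PySem.Str.join ""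
        (((xs.zip ys).map (fun p => p.1 ++ "    " ++ p.2)
          ++ xs.drop (min xs.length ys.length) ++ ys.drop (min xs.length ys.length)).map
          (fun line => line ++ "\n")) := by
  rcases Nat.lt_trichotomy ys.length xs.length with hlt | heq | hgt
  · have hmin : min xs.length ys.length = ys.length := by omega
    rw [if_pos (by omega)]
    rw [pairLoop xs ys ys.length (by omega), tailLoop xs ys.length _, hmin]
    have h2 : ys.drop ys.length = ([] : List String) := by simp
    rw [h2]
    simp [pv_join_append]
  · have hmin : min xs.length ys.length = xs.length := by omega
    rw [if_neg (by omega), if_neg (by omega)]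
    rw [pairLoop xs ys xs.length (by omega), hmin]
    have h1 : xs.drop xs.length = ([] : List String) := by simp
    have h2 : ys.drop xs.length = ([] : List String) := by rw [← heq]; simp
    rw [h1, h2]
    simp
  · have hmin : min xs.length ys.length = xs.length := by omega
    rw [if_neg (by omega), if_pos (by omega)]
    rw [pairLoop xs ys xs.length (by omega), tailLoop ys xs.length _, hmin]
    have h1 : xs.drop xs.length = ([] : List String) := by simp
    rw [h1]
    simp [pv_join_append]

-- B-side lemmas: the row-wise loop produces exactly the zip-plus-tails line list.
theorem pv_join_single (a : String) : PySem.Str.join "    " [a] = a := by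
  simp [PySem.Str.join, PySem.Chars.join, List.intercalate]
theorem pv_join_pair (a b : String) : PySem.Str.join "    " [a, b] = a ++ "    " ++ b := by
  simp [PySem.Str.join, PySem.Chars.join, List.intercalate, String.append_assoc]
  rw [show (' ' :: ' ' :: ' ' :: ' ' :: b.toList) = "    ".toList ++ b.toList from rfl,
    String.ofList_append, String.ofList_toList, String.ofList_toList]
theorem pv_mapRange_getD (l : List String) :
    (List.range l.length).map (fun i => l.getD i "") = l := by
  induction l with
  | nil => rfl
  | cons x t ih =>
    rw [List.length_cons, List.range_succ_eq_map]
    simp only [List.map_cons, List.map_map, Function.comp_def, List.getD_cons_zero,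
      List.getD_cons_succ]
    rw [ih]

theorem pv_rows (xs ys : List String) :
    (List.range (max xs.length ys.length)).map (fun i =>
        PySem.Str.join "    " ((if i < xs.length then [xs.getD i ""] else [])
          ++ (if i < ys.length then [ys.getD i ""] else [])))
    = (xs.zip ys).map (fun p => p.1 ++ "    " ++ p.2)
        ++ xs.drop (min xs.length ys.length) ++ ys.drop (min xs.length ys.length) := by
  induction xs generalizing ys with
  | nil =>
    simp only [List.length_nil, Nat.max_eq_right (Nat.zero_le _), Nat.min_eq_left (Nat.zero_le _),
      List.zip_nil_left, List.map_nil, List.drop_nil, List.nil_append, List.drop_zero]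
    calc (List.range ys.length).map (fun i =>
            PySem.Str.join "    " ((if i < 0 then [([] : List String).getD i ""] else [])
              ++ (if i < ys.length then [ys.getD i ""] else [])))
        = (List.range ys.length).map (fun i => ys.getD i "") := by
          apply List.map_congr_left
          intro i hi
          rw [List.mem_range] at hi
          simp [hi, pv_join_single]
      _ = ys := pv_mapRange_getD ys
  | cons x xs ih =>
    cases ys with
    | nil =>
      simp only [List.length_nil, Nat.max_eq_left (Nat.zero_le _), Nat.min_eq_right (Nat.zero_le _),
        List.zip_nil_right, List.map_nil, List.drop_nil, List.nil_append, List.drop_zero,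
        List.append_nil]
      calc (List.range (x :: xs).length).map (fun i =>
              PySem.Str.join "    " ((if i < (x :: xs).length then [(x :: xs).getD i ""] else [])
                ++ (if i < 0 then [([] : List String).getD i ""] else [])))
          = (List.range (x :: xs).length).map (fun i => (x :: xs).getD i "") := by
            apply List.map_congr_left
            intro i hi
            rw [List.mem_range] at hi
            rw [if_neg (Nat.not_lt_zero i), List.append_nil, if_pos hi, pv_join_single]
        _ = x :: xs := pv_mapRange_getD (x :: xs)
    | cons y ys =>
      have hmax : max (x :: xs).length (y :: ys).length = max xs.length ys.length + 1 := by
        simp [Nat.succ_max_succ]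
      have hmin : min (x :: xs).length (y :: ys).length = min xs.length ys.length + 1 := by
        simp [Nat.succ_min_succ]
      rw [hmax, hmin, List.range_succ_eq_map, List.map_cons, List.map_map]
      have hhead : PySem.Str.join "    "
          ((if 0 < (x :: xs).length then [(x :: xs).getD 0 ""] else [])
            ++ (if 0 < (y :: ys).length then [(y :: ys).getD 0 ""] else []))
          = x ++ "    " ++ y := by
        simp [pv_join_pair]
      have htail : ∀ i : Nat,
          ((fun i => PySem.Str.join "    " ((if i < (x :: xs).length then [(x :: xs).getD i ""] else [])
              ++ (if i < (y :: ys).length then [(y :: ys).getD i ""] else []))) ∘ Nat.succ) i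
          = (fun i => PySem.Str.join "    " ((if i < xs.length then [xs.getD i ""] else [])
              ++ (if i < ys.length then [ys.getD i ""] else []))) i := by
        intro i
        simp [Function.comp]
      rw [hhead, List.map_congr_left (fun i _ => htail i), ih ys]
      simp [List.zip, String.append_assoc]

theorem pv_foldl_rows (l : List Nat) (f : Nat → String) (init : List String) :
    PySem.Str.join "" (l.foldl (fun acc i => acc ++ [f i, "\n"]) init)
      = PySem.Str.join "" init ++ PySem.Str.join "" (l.map (fun i => f i ++ "\n")) := by
  induction l generalizing init with
  | nil => simp [pv_join_nil]
  | cons a t ih =>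
    simp only [List.foldl_cons, List.map_cons, ih, pv_join_append, pv_join_cons, pv_join_nil]
    simp [String.append_assoc]

-- ===== VERDICT (by name: the statement is the Claim_ definition above) =====
theorem formatToStr_spec : Claim_equal_formatToStr := by
  intro str1 str2 _
  unfold Spec_formatToStr formatToStr formatToStr_alt
  set xs := (PySem.Str.split? str1 "\n").getD [] with hxs
  set ys := (PySem.Str.split? str2 "\n").getD [] with hys
  rw [pv_core xs ys]
  rw [pv_foldl_rows (List.range (max xs.length ys.length))
    (fun i => PySem.Str.join "    " ((if i < xs.length then [xs.getD i ""] else [])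
      ++ (if i < ys.length then [ys.getD i ""] else []))) []]
  rw [show ((List.range (max xs.length ys.length)).map (fun i =>
      (fun i => PySem.Str.join "    " ((if i < xs.length then [xs.getD i ""] else [])
        ++ (if i < ys.length then [ys.getD i ""] else []))) i ++ "\n"))
    = (((List.range (max xs.length ys.length)).map (fun i =>
        PySem.Str.join "    " ((if i < xs.length then [xs.getD i ""] else [])
          ++ (if i < ys.length then [ys.getD i ""] else [])))).map (fun line => line ++ "\n"))
    by rw [List.map_map]; rfl]
  rw [pv_rows xs ys]
  simp [pv_join_nil]
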